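-- pv_equiv track=rewrite | github.com/LauryGirl/Years-Stadistics | APIproject/questionnaire/backend/poll.py | themes_modify
-- ===== SOURCE A (Python) =====
-- def themes_modify(t, dict_):
--     t0 = {}
--     nones_count = 0
--
--     for key, values in t.items():
--         for value in values:
--             if value == "none":
--                 dict_[key] = nones_count
--                 nones_count += 1
--
--     for (theme, subthemes) in t.items():
--         add = []
--         for sub in subthemes:
--             if sub == "none":
--                 add.append("none" + str(dict_[theme]))
--             else:
--                 add.append(sub)
--         t0[theme] = add
--     return t0
-- ===== SOURCE B (Python) =====
-- def themes_modify(t, dict_):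
--     # Single pass over t.items(): count the "none"s of each key once; the label A
--     # ends up storing for a key is (running total before this key) + m - 1.
--     # Return-value equivalent to A; unlike A, does not mutate dict_ (A writes
--     # per-key counters into it), and never reads dict_.
--     t0 = {}
--     nones_count = 0
--     for key, values in t.items():
--         m = values.count("none")
--         if m:
--             label = nones_count + m - 1
--             nones_count += m
--             t0[key] = ["none" + str(label) if s == "none" else s for s in values]
--         else:
--             t0[key] = values
--     return t0
-- ===== Notes on version B (the rewrite author's own statement) =====
-- stated objective: simpler
-- what changed: The two full passes over t (one mutating dict_ value-by-value, one re-reading it) are fused into one pass per key that counts the key's "none"s once and computes the label nones_count+m-1 in closed form, so dict_ is never read or written.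
import Mathlib
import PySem

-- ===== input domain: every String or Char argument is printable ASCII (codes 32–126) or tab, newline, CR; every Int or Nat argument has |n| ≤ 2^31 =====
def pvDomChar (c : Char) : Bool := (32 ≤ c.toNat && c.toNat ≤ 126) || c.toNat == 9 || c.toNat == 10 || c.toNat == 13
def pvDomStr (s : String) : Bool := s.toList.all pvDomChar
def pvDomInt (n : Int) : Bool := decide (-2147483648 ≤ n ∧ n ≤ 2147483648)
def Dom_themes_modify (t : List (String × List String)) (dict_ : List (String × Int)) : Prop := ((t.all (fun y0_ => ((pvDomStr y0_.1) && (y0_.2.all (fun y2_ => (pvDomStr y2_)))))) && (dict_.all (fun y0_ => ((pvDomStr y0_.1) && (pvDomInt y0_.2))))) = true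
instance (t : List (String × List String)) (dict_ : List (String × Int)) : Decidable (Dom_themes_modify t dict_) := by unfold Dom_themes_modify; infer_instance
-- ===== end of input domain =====

-- B fuses A's two passes into one pass that counts each key's "none"s once and computes the
-- label in closed form, never touching dict_ ('simpler'); A mutates dict_ in place, B does not —
-- the equivalence proved here is about the RETURN value only.


-- ===== PORT A =====
-- first loop: 'for value in values: if value == "none": dict_[key] = nones_count; nones_count += 1'
def pvA_step (st : PySem.Dict String Int × Int) (kv : String × List String) :
    PySem.Dict String Int × Int :=
  kv.2.foldl (fun st v => if v == "none" then (st.1.insert kv.1 st.2, st.2 + 1) else st) st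

def pvA_pass1 (t : List (String × List String)) (st : PySem.Dict String Int × Int) :
    PySem.Dict String Int × Int :=
  t.foldl pvA_step st

-- second loop body: dict_[theme] is looked up only when sub == "none", and then pass 1 has
-- inserted theme, so the getD default 0 is unreachable (Python raises only on a missing key).
def pvA_render (d : PySem.Dict String Int) (theme : String) (subs : List String) : List String :=
  subs.foldl (fun add sub =>
    add ++ [if sub == "none" then "none" ++ PySem.Int.toStr (d.getD theme 0) else sub]) []

def themes_modify (t : List (String × List String)) (dict_ : List (String × Int)) :
    List (String × List String) :=
  let st := pvA_pass1 t (PySem.Dict.mk dict_, 0)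
  (t.foldl (fun t0 kv => t0.insert kv.1 (pvA_render st.1 kv.1 kv.2))
      (PySem.Dict.empty : PySem.Dict String (List String))).items

-- ===== PORT B =====
-- Source B loop body: m = values.count("none"); if m: label = nones_count + m - 1; …
def pvB_step (acc : PySem.Dict String (List String) × Int) (kv : String × List String) :
    PySem.Dict String (List String) × Int :=
  let m : Int := (PySem.List.count kv.2 "none" : Int)
  if m ≠ 0 then
    let label := acc.2 + m - 1
    (acc.1.insert kv.1
        (kv.2.map (fun s => if s == "none" then "none" ++ PySem.Int.toStr label else s)),
     acc.2 + m)
  else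
    (acc.1.insert kv.1 kv.2, acc.2)

def themes_modify_alt (t : List (String × List String)) (dict_ : List (String × Int)) :
    List (String × List String) :=
  (t.foldl pvB_step ((PySem.Dict.empty : PySem.Dict String (List String)), 0)).1.items

-- ===== PRECONDITION & SPEC =====
-- Pre_ excludes association lists t whose keys repeat: they do not represent any Python dict
-- (t is a dict in A), so A is never called on them.  dict_ is unconstrained.
def Pre_themes_modify (t : List (String × List String)) (dict_ : List (String × Int)) : Prop :=
  (t.map Prod.fst).Nodup

instance (t : List (String × List String)) (dict_ : List (String × Int)) :
    Decidable (Pre_themes_modify t dict_) := by unfold Pre_themes_modify; infer_instance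

def pvWitness_themes_modify : (List (String × List String)) × (List (String × Int)) :=
  ([("a", ["none", "x"]), ("b", ["none"])], [("c", 3)])

def Spec_themes_modify (t : List (String × List String)) (dict_ : List (String × Int))
    (out : List (String × List String)) : Prop := out = themes_modify_alt t dict_
instance (t : List (String × List String)) (dict_ : List (String × Int))
    (out : List (String × List String)) : Decidable (Spec_themes_modify t dict_ out) := by
  unfold Spec_themes_modify; infer_instance

-- ===== CLAIM =====
def Claim_equal_themes_modify : Prop :=
  ∀ (t : List (String × List String)) (dict_ : List (String × Int)),
    Dom_themes_modify t dict_ → Pre_themes_modify t dict_ →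
      Spec_themes_modify t dict_ (themes_modify t dict_)

-- ===== LEMMAS AND PROOFS =====

-- renaming function shared by the closed forms of both ports
def pvRen (label : Int) (s : String) : String :=
  if s == "none" then "none" ++ PySem.Int.toStr label else s

-- common closed form of both ports' results
def pvSpec : List (String × List String) → Int → List (String × List String)
  | [], _ => []
  | (k, vs) :: rest, c =>
    (k, if vs.count "none" = 0 then vs else vs.map (pvRen (c + (vs.count "none" : Int) - 1)))
      :: pvSpec rest (c + (vs.count "none" : Int))

lemma pvA_inner (k : String) (vs : List String) (d : PySem.Dict String Int) (c : Int) :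
    vs.foldl (fun st v => if v == "none" then (st.1.insert k st.2, st.2 + 1) else st) (d, c) =
      (if vs.count "none" = 0 then d else d.insert k (c + (vs.count "none" : Int) - 1),
       c + (vs.count "none" : Int)) := by
  induction vs generalizing d c with
  | nil => simp
  | cons v tl ih =>
    simp only [List.foldl_cons]
    by_cases hv : v = "none"
    · subst hv
      simp only [BEq.rfl, if_true]
      rw [ih]
      by_cases h0 : tl.count "none" = 0
      · simp only [List.count_cons, h0, if_pos h0]
        simp [PySem.Dict.insert_insert_self]
      · simp only [List.count_cons, h0, if_neg h0]
        have : tl.count "none" + 1 ≠ 0 := by omega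
        simp only [if_neg this, beq_self_eq_true, if_true,
          PySem.Dict.insert_insert_self]
        have hm : c + 1 + ((tl.count "none" : Nat) : Int) - 1 = c + (((tl.count "none" + 1 : Nat)) : Int) - 1 := by push_cast; ring
        have hm2 : c + 1 + ((tl.count "none" : Nat) : Int) = c + (((tl.count "none" + 1 : Nat)) : Int) := by push_cast; ring
        simp [hm, hm2]
    · have hb : (v == "none") = false := by simp [hv]
      simp only [hb, if_false]
      rw [ih]
      simp [List.count_cons, hv]

lemma pvA_step_eq (d : PySem.Dict String Int) (c : Int) (k : String) (vs : List String) :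
    pvA_step (d, c) (k, vs) =
      (if vs.count "none" = 0 then d else d.insert k (c + (vs.count "none" : Int) - 1),
       c + (vs.count "none" : Int)) := pvA_inner k vs d c

lemma pvA_pass1_get? (t : List (String × List String)) (d : PySem.Dict String Int) (c : Int)
    {k : String} (hk : k ∉ t.map Prod.fst) :
    (pvA_pass1 t (d, c)).1.get? k = d.get? k := by
  induction t generalizing d c with
  | nil => rfl
  | cons kv rest ih =>
    obtain ⟨k1, vs⟩ := kv
    simp only [List.map_cons, List.mem_cons, not_or] at hk
    obtain ⟨hk1, hkr⟩ := hk
    simp only [pvA_pass1, List.foldl_cons]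
    rw [show (List.foldl pvA_step (pvA_step (d, c) (k1, vs)) rest) = pvA_pass1 rest (pvA_step (d, c) (k1, vs)) from rfl]
    rw [pvA_step_eq]
    by_cases h0 : vs.count "none" = 0
    · simp only [if_pos h0]
      exact ih _ _ hkr
    · simp only [if_neg h0]
      rw [ih _ _ hkr, PySem.Dict.get?_insert_of_ne _ _ hk1]

lemma map_ren_of_count_zero (vs : List String) (lbl : Int) (h : vs.count "none" = 0) :
    vs.map (pvRen lbl) = vs := by
  induction vs with
  | nil => rfl
  | cons v tl ih =>
    simp only [List.count_cons] at h
    by_cases hv : v = "none"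
    · simp [hv] at h
    · have : tl.count "none" = 0 := by
        by_cases hb : ("none" : String) = v <;> simp [hb] at h <;> omega
      simp [pvRen, hv, ih this]

lemma pvA_map_eq_spec (t : List (String × List String)) (d : PySem.Dict String Int) (c : Int)
    (hnd : (t.map Prod.fst).Nodup) :
    t.map (fun kv => (kv.1, kv.2.map (pvRen ((pvA_pass1 t (d, c)).1.getD kv.1 0)))) =
      pvSpec t c := by
  induction t generalizing d c with
  | nil => rfl
  | cons kv rest ih =>
    obtain ⟨k, vs⟩ := kv
    simp only [List.map_cons, List.nodup_cons] at hnd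
    obtain ⟨hk, hnd'⟩ := hnd
    simp only [List.map_cons, pvSpec]
    rw [show pvA_pass1 ((k, vs) :: rest) (d, c) = pvA_pass1 rest (pvA_step (d, c) (k, vs)) from rfl]
    rw [pvA_step_eq]
    by_cases h0 : vs.count "none" = 0
    · simp only [if_pos h0]
      rw [map_ren_of_count_zero _ _ h0, ih _ _ hnd']
    · simp only [if_neg h0]
      have hg : (pvA_pass1 rest (d.insert k (c + (vs.count "none" : Int) - 1),
          c + (vs.count "none" : Int))).1.getD k 0 = c + (vs.count "none" : Int) - 1 := by
        rw [PySem.Dict.getD_eq_get?_getD, pvA_pass1_get? _ _ _ hk, PySem.Dict.get?_insert_self]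
        rfl
      rw [hg, ih _ _ hnd']

lemma pvB_fold_eq (t : List (String × List String)) (acc : PySem.Dict String (List String))
    (c : Int) (hfresh : ∀ kv ∈ t, acc.contains kv.1 = false)
    (hnd : (t.map Prod.fst).Nodup) :
    (t.foldl pvB_step (acc, c)).1.items = acc.items ++ pvSpec t c := by
  induction t generalizing acc c with
  | nil => simp [pvSpec]
  | cons kv rest ih =>
    obtain ⟨k, vs⟩ := kv
    simp only [List.map_cons, List.nodup_cons] at hnd
    obtain ⟨hk, hnd'⟩ := hnd
    have hacck : acc.contains k = false := hfresh (k, vs) (List.mem_cons_self ..)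
    have hfresh' : ∀ kv ∈ rest, ∀ (X : List String), ((acc.insert k X).contains kv.1) = false := by
      intro kv hkv X
      rw [PySem.Dict.contains_insert]
      have h1 : (kv.1 == k) = false := by
        simp only [beq_eq_false_iff_ne, ne_eq]
        intro he
        exact hk (he ▸ List.mem_map_of_mem hkv)
      rw [h1, hfresh kv (List.mem_cons_of_mem _ hkv)]
      rfl
    simp only [List.foldl_cons, pvSpec, pvB_step, PySem.List.count_eq]
    by_cases h0 : vs.count "none" = 0
    · have hz : ¬((vs.count "none" : Int) ≠ 0) := by omega
      rw [if_neg hz, if_pos h0, ih _ _ (fun kv hkv => hfresh' kv hkv vs) hnd',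
        PySem.Dict.items_insert_of_not_contains _ _ hacck]
      simp [h0]
    · have hz : ((vs.count "none" : Int) ≠ 0) := by omega
      rw [if_pos hz, if_neg h0, ih _ _ (fun kv hkv => hfresh' kv hkv _) hnd',
        PySem.Dict.items_insert_of_not_contains _ _ hacck]
      simp [pvRen]

lemma pvA_render_eq (d : PySem.Dict String Int) (theme : String) (subs : List String) :
    pvA_render d theme subs = subs.map (pvRen (d.getD theme 0)) := by
  show subs.foldl (fun acc x => acc ++ [pvRen (d.getD theme 0) x]) [] = _
  rw [PySem.List.foldl_append_singleton_eq_map, List.nil_append]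

-- ===== VERDICT =====
theorem themes_modify_spec : Claim_equal_themes_modify := by
  intro t dict_ _hDom hPre
  unfold Spec_themes_modify themes_modify themes_modify_alt
  rw [PySem.Dict.items_foldl_insert_fresh t (fun kv => kv.1) _ _
      (fun a _ => PySem.Dict.contains_empty _) hPre]
  rw [pvB_fold_eq t _ 0 (fun kv _ => PySem.Dict.contains_empty _) hPre]
  show List.map _ t = [] ++ pvSpec t 0
  rw [List.nil_append]
  simp only [pvA_render_eq]
  exact pvA_map_eq_spec t _ 0 hPre
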